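-- pv_equiv track=rewrite | github.com/daniel-reich/turbo-robot | iK2F9DNAiTor2wFob_24.py | calc
-- ===== SOURCE A (Python) =====
-- def calc(s):
--     num1 = ''
--     num2 = ''
--     sum1 = 0
--     sum2 = 0
--     for n in s:
--         num1 += str(ord(n))
--     for i in num1:
--         if int(i) == 7:
--             num2 += str(1)
--         else:
--             num2 += str(i)
--     for l in num1:
--         sum1 += int(l)
--     for l in num2:
--         sum2 += int(l)
--     return sum1-sum2
-- ===== SOURCE B (Python) =====
-- def calc(s):
--     count = 0
--     for c in s:
--         count += str(ord(c)).count('7')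
--     return 6 * count
-- ===== Notes on version B (the rewrite author's own statement) =====
-- stated objective: simpler
-- what changed: B replaces A's four passes (building the concatenated ord-string, building a substituted copy, and summing the digits of both) by one pass that counts occurrences of the digit seven in each character's ord-string and returns 6 times that count, since substituting seven by one changes each such digit's contribution by exactly 6.
import Mathlib
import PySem

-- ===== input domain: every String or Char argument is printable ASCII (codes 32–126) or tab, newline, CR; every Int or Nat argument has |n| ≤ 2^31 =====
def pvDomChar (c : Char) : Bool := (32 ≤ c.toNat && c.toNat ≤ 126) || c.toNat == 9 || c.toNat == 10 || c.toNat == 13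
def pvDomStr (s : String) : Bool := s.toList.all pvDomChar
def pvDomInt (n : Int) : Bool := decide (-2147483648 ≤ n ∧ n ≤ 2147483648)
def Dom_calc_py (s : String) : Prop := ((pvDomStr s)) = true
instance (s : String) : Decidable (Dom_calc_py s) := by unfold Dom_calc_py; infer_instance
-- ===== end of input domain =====

-- B computes the same value in one pass, counting '7' digits in each ord-string and returning 6 * count (simpler).

-- ===== PORT A =====
-- int(i) on a single char of num1 is ported as (PySem.Int.ofChars? [i]).getD 0; this is exact here
-- because num1 consists only of decimal digits (the decimal digits of ord(c) for chars in Dom).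
def calc_py (s : String) : Int :=
  let num1 : List Char := s.toList.foldl (fun acc n => acc ++ PySem.Int.toChars (n.toNat : Int)) []
  let num2 : List Char := num1.foldl
    (fun acc i => acc ++ (if (PySem.Int.ofChars? [i]).getD 0 == 7 then PySem.Int.toChars 1 else [i])) []
  let sum1 : Int := num1.foldl (fun a l => a + (PySem.Int.ofChars? [l]).getD 0) 0
  let sum2 : Int := num2.foldl (fun a l => a + (PySem.Int.ofChars? [l]).getD 0) 0
  sum1 - sum2

-- ===== PORT B =====
def calc_py_alt (s : String) : Int :=
  let count : Int := s.toList.foldl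
    (fun acc c => acc + ((PySem.Int.toChars (c.toNat : Int)).count '7' : Int)) 0
  6 * count

-- ===== PRECONDITION & SPEC =====
def Spec_calc_py (s : String) (out : Int) : Prop := out = calc_py_alt s
instance (s : String) (out : Int) : Decidable (Spec_calc_py s out) := by unfold Spec_calc_py; infer_instance

-- ===== CLAIM (what is proved, stated in full; the proofs are below) =====
def Claim_equal_calc_py : Prop := ∀ (s : String), Dom_calc_py s → Spec_calc_py s (calc_py s)

-- ===== LEMMAS AND PROOFS =====

-- per-character fact, checked by decide over all 127 domain character codes:
-- digit-sum of str(n) minus digit-sum of its 7→1 substitution is 6 · (number of '7' digits)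
theorem pvPerChar : ∀ n : Nat, n < 127 →
    ((PySem.Int.toChars (n : Int)).map (fun l => (PySem.Int.ofChars? [l]).getD 0)).sum
      - (((PySem.Int.toChars (n : Int)).flatMap
            (fun i => if (PySem.Int.ofChars? [i]).getD 0 == 7 then PySem.Int.toChars 1 else [i])).map
          (fun l => (PySem.Int.ofChars? [l]).getD 0)).sum
      = 6 * ((PySem.Int.toChars (n : Int)).count '7' : Int) := by
  decide

theorem pvMain : ∀ l : List Char, l.all pvDomChar = true →
    ((l.flatMap (fun n => PySem.Int.toChars (n.toNat : Int))).map
        (fun x => (PySem.Int.ofChars? [x]).getD 0)).sum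
      - (((l.flatMap (fun n => PySem.Int.toChars (n.toNat : Int))).flatMap
            (fun i => if (PySem.Int.ofChars? [i]).getD 0 == 7 then PySem.Int.toChars 1 else [i])).map
          (fun x => (PySem.Int.ofChars? [x]).getD 0)).sum
      = 6 * (l.map (fun c => ((PySem.Int.toChars (c.toNat : Int)).count '7' : Int))).sum := by
  intro l hl
  induction l with
  | nil => simp
  | cons c t ih =>
    simp only [List.all_cons, Bool.and_eq_true] at hl
    have hc : c.toNat < 127 := by
      have h1 : pvDomChar c = true := hl.1
      unfold pvDomChar at h1
      simp only [Bool.or_eq_true, Bool.and_eq_true, decide_eq_true_eq, beq_iff_eq] at h1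
      rcases h1 with h | h
      · rcases h with h | h
        · omega
        · omega
      · omega
    have hper := pvPerChar c.toNat hc
    have iht := ih hl.2
    simp only [List.flatMap_cons, List.flatMap_append, List.map_append, List.sum_append,
      List.map_cons, List.sum_cons]
    omega

theorem calc_py_spec_aux (s : String) (h : Dom_calc_py s) : calc_py s = calc_py_alt s := by
  have hmain := pvMain s.toList h
  simp only [calc_py, calc_py_alt]
  rw [PySem.List.foldl_append_eq_flatMap, PySem.List.foldl_append_eq_flatMap,
      PySem.List.foldl_add, PySem.List.foldl_add, PySem.List.foldl_add]
  simp only [List.nil_append, zero_add]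
  exact hmain

-- ===== VERDICT (by name: the statement is the Claim_ definition above) =====
theorem calc_py_spec : Claim_equal_calc_py := by
  intro s h
  exact calc_py_spec_aux s h
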